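-- pv_equiv track=rewrite | github.com/jnheo1216/TIL | algorithm/4831_전기버스/s1.py | charge_point
-- ===== SOURCE A (Python) =====
-- def charge_point(k, n, m, charger_location):
--     bus_locate = 0  # 버스가 위치하는 지점
--     charge_count = 0  # 충전한 횟수
--
--     while True:
--         bus_locate += k  # 버스가 이동할 수 있는 최대 거리
--         if bus_locate >= n:  # 탈출 조건
--             break
--         for i in range(1, m):
--             if bus_locate < charger_location[i] and bus_locate >= charger_location[i-1]:  # 버스가 움직이는 최대거리 바로 전에 있는 충전소 찾기
--                 bus_locate = charger_location[i-1]  # 충전한 충전소부터 출발해야함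
--             if charger_location[i] - charger_location[i-1] > k:  # 충전소 사이의 거리가 버스 최대 거리보다 크면 못가니까 바로 반환
--                 return 0
--
--         charge_count += 1   # 충전횟수 추가해줌
--
--     return charge_count
-- ===== SOURCE B (Python) =====
-- def charge_point(k, n, m, charger_location):
--     stops = charger_location[:m]
--     # A single pass over the whole route decides feasibility: every leg
--     # (start -> first stop, stop -> stop, last stop -> goal) must be within k.
--     route = [0] + stops + [n]
--     if any(b - a > k for a, b in zip(route, route[1:])):
--         return 0
--     count = 0
--     pos = 0
--     while pos + k < n:
--         # rightmost stop within reach of pos (bisect_right, hand-rolled)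
--         lo, hi = 0, len(stops)
--         while lo < hi:
--             mid = (lo + hi) // 2
--             if stops[mid] <= pos + k:
--                 lo = mid + 1
--             else:
--                 hi = mid
--         pos = stops[lo - 1]
--         count += 1
--     return count
-- ===== Notes on version B (the rewrite author's own statement) =====
-- stated objective: alternative
-- what changed: B checks the whole route's feasibility (start -> chargers -> goal) in one up-front pass instead of A's re-scan of all m charger pairs on every loop iteration, and finds each recharge stop by binary search instead of A's per-iteration linear scan; Pre_ excludes m outside [0, len] (negative m is outside the natural domain, m > len makes A raise IndexError when a charge is needed) and the k <= 0 / unsorted-prefix inputs with no oversized gap, where A's loop can run forever or its snap-back depends on accidental element order.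
-- intended difference: On trips that need a charge (k < n) whose inter-charger gaps all fit in k but whose first charger is beyond k from the start, whose goal is beyond k from the last charger, or with no charger at all, A returns a positive charge count as if the bus could recharge on open road, while B returns 0 (trip impossible), the intended answer. — e.g. on charge_point(2, 10, 1, [5]): A returns 4, B returns 0
-- outside the precondition, e.g. on charge_point(5, 13, 5, [4, 2, 2, 6, 5]): A returns 3, B returns 0; on charge_point(2, 10, 5, [0, 9]): A returns 0, B returns 0; on charge_point(2, 5, -1, [9, 9, 9]): A returns 2, B returns 0
import Mathlib
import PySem

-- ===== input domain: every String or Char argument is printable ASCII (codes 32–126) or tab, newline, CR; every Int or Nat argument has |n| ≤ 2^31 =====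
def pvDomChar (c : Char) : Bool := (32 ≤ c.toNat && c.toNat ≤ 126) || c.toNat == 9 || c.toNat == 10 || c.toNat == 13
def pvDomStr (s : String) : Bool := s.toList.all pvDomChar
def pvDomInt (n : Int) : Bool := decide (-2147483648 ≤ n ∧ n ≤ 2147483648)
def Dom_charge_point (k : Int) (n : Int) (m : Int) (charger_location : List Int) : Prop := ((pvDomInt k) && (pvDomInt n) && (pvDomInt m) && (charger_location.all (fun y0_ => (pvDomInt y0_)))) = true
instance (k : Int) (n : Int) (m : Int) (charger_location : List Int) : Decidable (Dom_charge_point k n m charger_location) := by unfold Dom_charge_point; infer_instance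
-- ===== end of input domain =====

-- B checks route feasibility (start → stops → goal) once up front and then drives greedily,
-- finding each recharge stop by binary search; B returns 0 on routes with an unreachable first
-- stop or goal, where A returns a positive count (stated as the intended difference D_ below).

-- ===== PORT A =====
-- A's inner 'for i in range(1, m)' loop: snaps bus_locate, and 'return 0' on an
-- oversized gap is modelled as none.  Indexing uses pyGetD _ _ 0; Pre_ keeps every
-- index in range (Python raises IndexError otherwise), so the default is never read.
def chargeInner (k : Int) (cl : List Int) : List Int → Int → Option Int
  | [], bus => some bus
  | i :: rest, bus =>
    let ci := PySem.List.pyGetD cl i 0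
    let cp := PySem.List.pyGetD cl (i - 1) 0
    let bus' := if bus < ci ∧ cp ≤ bus then cp else bus
    if ci - cp > k then none else chargeInner k cl rest bus'

-- A's 'while True' loop, fueled.  Under Pre_ the bus position strictly increases every
-- iteration, so n.toNat + 1 iterations always suffice for the Python loop's lifetime.
def chargeLoopA (k n m : Int) (cl : List Int) : Nat → Int → Int → Int
  | 0, _, count => count
  | fuel + 1, bus, count =>
    let bus1 := bus + k
    if n ≤ bus1 then count
    else
      match chargeInner k cl (PySem.List.pyRange 1 m 1) bus1 with
      | none => 0
      | some bus' => chargeLoopA k n m cl fuel bus' (count + 1)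

def charge_point (k : Int) (n : Int) (m : Int) (charger_location : List Int) : Int :=
  chargeLoopA k n m charger_location (n.toNat + 1) 0 0

-- ===== PORT B =====
-- Source B's 'any(b - a > k for a, b in zip(route, route[1:]))'
def tooFar (k : Int) (route : List Int) : Bool :=
  (route.zip route.tail).any (fun p => decide (p.2 - p.1 > k))

-- Source B's hand-rolled bisect_right: 'while lo < hi' halves [lo, hi), so len(stops) + 1
-- steps always suffice (the interval size starts at len(stops) and strictly shrinks).
def bisectLoop (stops : List Int) (x : Int) : Nat → Int → Int → Int
  | 0, lo, _ => lo
  | fuel + 1, lo, hi =>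
    if lo < hi then
      let mid := PySem.Int.floordiv (lo + hi) 2
      if PySem.List.pyGetD stops mid 0 ≤ x then bisectLoop stops x fuel (mid + 1) hi
      else bisectLoop stops x fuel lo mid
    else lo

-- Source B's 'while pos + k < n' driving loop, fueled like A's (pos strictly increases
-- per iteration under Pre_, and pos < n on entry, so n.toNat + 1 steps suffice).
def chargeLoopB (k n : Int) (stops : List Int) : Nat → Int → Int → Int
  | 0, _, count => count
  | fuel + 1, pos, count =>
    if pos + k < n then
      let lo := bisectLoop stops (pos + k) (stops.length + 1) 0 (stops.length : Int)
      chargeLoopB k n stops fuel (PySem.List.pyGetD stops (lo - 1) 0) (count + 1)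
    else count

def charge_point_alt (k : Int) (n : Int) (m : Int) (charger_location : List Int) : Int :=
  let stops := PySem.List.slice charger_location none (some m)
  let route := 0 :: (stops ++ [n])
  if tooFar k route then 0
  else chargeLoopB k n stops (n.toNat + 1) 0 0

-- ===== PRECONDITION & SPEC =====
-- Pre_ admits every n ≤ k input (A returns 0 at once); when a charge is needed it
-- restricts m to the natural charger count 0 ≤ m ≤ len (negative m is outside the
-- problem's domain and m > len makes A raise IndexError), and excludes the k ≤ 0 /
-- unsorted-prefix inputs with no oversized gap, on which A's while loop can run
-- forever, and on which, when A does return, its snap-back depends on the accidental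
-- element order.  (A always returns whenever n ≤ k, some consecutive gap exceeds k, or
-- k ≥ 1 with a sorted charger prefix — all of these are admitted.)
def Pre_charge_point (k : Int) (n : Int) (m : Int) (charger_location : List Int) : Prop :=
  n ≤ k ∨
  (0 ≤ m ∧ m ≤ (charger_location.length : Int) ∧
    ((∃ i ∈ PySem.List.pyRange 1 m 1,
        PySem.List.pyGetD charger_location i 0
          - PySem.List.pyGetD charger_location (i - 1) 0 > k) ∨
     (1 ≤ k ∧ List.Pairwise (· ≤ ·) (charger_location.take m.toNat))))
instance (k : Int) (n : Int) (m : Int) (charger_location : List Int) : Decidable (Pre_charge_point k n m charger_location) := by unfold Pre_charge_point; infer_instance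

def pvWitness_charge_point : Int × Int × Int × List Int := (2, 10, 3, [1, 3, 5])

-- On trips that need a charge (k < n) whose inter-charger gaps all fit in k but whose first
-- charger is out of reach from the start, whose goal is out of reach from the last charger,
-- or which have no charger at all, A returns a positive count as if the bus could recharge
-- on open road, while B returns 0 (trip impossible) — the intended answer.
def D_charge_point (k : Int) (n : Int) (m : Int) (charger_location : List Int) : Prop :=
  k < n ∧
  (∀ i ∈ PySem.List.pyRange 1 m 1,
     PySem.List.pyGetD charger_location i 0
       - PySem.List.pyGetD charger_location (i - 1) 0 ≤ k) ∧
  (m ≤ 0 ∨ k < PySem.List.pyGetD charger_location 0 0 ∨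
     PySem.List.pyGetD charger_location (m - 1) 0 + k < n)
instance (k : Int) (n : Int) (m : Int) (charger_location : List Int) : Decidable (D_charge_point k n m charger_location) := by unfold D_charge_point; infer_instance

def Spec_charge_point (k : Int) (n : Int) (m : Int) (charger_location : List Int) (out : Int) : Prop := ¬ D_charge_point k n m charger_location → out = charge_point_alt k n m charger_location
instance (k : Int) (n : Int) (m : Int) (charger_location : List Int) (out : Int) : Decidable (Spec_charge_point k n m charger_location out) := by unfold Spec_charge_point; infer_instance

def pvDiffWitness_charge_point : Int × Int × Int × List Int := (2, 10, 1, [5])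
def pvDiffWitnessOut_charge_point : Int × Int := (4, 0)

-- ===== CLAIM (what is proved, stated in full; the proofs are below) =====
def Claim_unchanged_charge_point : Prop := ∀ (k : Int) (n : Int) (m : Int) (charger_location : List Int), Dom_charge_point k n m charger_location → Pre_charge_point k n m charger_location → Spec_charge_point k n m charger_location (charge_point k n m charger_location)
def Claim_changed_charge_point : Prop := Dom_charge_point (pvDiffWitness_charge_point.1) (pvDiffWitness_charge_point.2.1) (pvDiffWitness_charge_point.2.2.1) (pvDiffWitness_charge_point.2.2.2) ∧ Pre_charge_point (pvDiffWitness_charge_point.1) (pvDiffWitness_charge_point.2.1) (pvDiffWitness_charge_point.2.2.1) (pvDiffWitness_charge_point.2.2.2) ∧ D_charge_point (pvDiffWitness_charge_point.1) (pvDiffWitness_charge_point.2.1) (pvDiffWitness_charge_point.2.2.1) (pvDiffWitness_charge_point.2.2.2) ∧ charge_point (pvDiffWitness_charge_point.1) (pvDiffWitness_charge_point.2.1) (pvDiffWitness_charge_point.2.2.1) (pvDiffWitness_charge_point.2.2.2) = pvDiffWitnessOut_charge_point.1 ∧ charge_point_alt (pvDiffWitness_charge_point.1) (pvDiffWitness_charge_point.2.1)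 (pvDiffWitness_charge_point.2.2.1) (pvDiffWitness_charge_point.2.2.2) = pvDiffWitnessOut_charge_point.2 ∧ pvDiffWitnessOut_charge_point.1 ≠ pvDiffWitnessOut_charge_point.2
def Claim_exact_charge_point : Prop := ∀ (k : Int) (n : Int) (m : Int) (charger_location : List Int), Dom_charge_point k n m charger_location → Pre_charge_point k n m charger_location → D_charge_point k n m charger_location → charge_point k n m charger_location ≠ charge_point_alt k n m charger_location

-- ===== LEMMAS AND PROOFS =====

-- shorthand for A/B's indexing (in range wherever the proofs use it)
def pvG (cl : List Int) (i : Int) : Int := PySem.List.pyGetD cl i 0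

-- the pure value of A's inner scan when no oversized gap aborts it
def pvScan (k : Int) (cl : List Int) (idxs : List Int) (bus : Int) : Int :=
  idxs.foldl (fun b i => if b < pvG cl i ∧ pvG cl (i - 1) ≤ b then pvG cl (i - 1) else b) bus

theorem pvScan_append (k : Int) (cl : List Int) (l1 l2 : List Int) (x : Int) :
    pvScan k cl (l1 ++ l2) x = pvScan k cl l2 (pvScan k cl l1 x) :=
  List.foldl_append

theorem pvScan_cons (k : Int) (cl : List Int) (i : Int) (l : List Int) (x : Int) :
    pvScan k cl (i :: l) x =
      pvScan k cl l (if x < pvG cl i ∧ pvG cl (i - 1) ≤ x then pvG cl (i - 1) else x) := rfl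

theorem chargeInner_none (k : Int) (cl : List Int) (idxs : List Int) (bus : Int)
    (h : ∃ i ∈ idxs, pvG cl i - pvG cl (i - 1) > k) :
    chargeInner k cl idxs bus = none := by
  induction idxs generalizing bus with
  | nil => simp at h
  | cons i rest ih =>
    obtain ⟨j, hj, hgt⟩ := h
    simp only [chargeInner]
    by_cases hg : PySem.List.pyGetD cl i 0 - PySem.List.pyGetD cl (i - 1) 0 > k
    · simp [hg]
    · rw [if_neg hg]
      rcases List.mem_cons.mp hj with rfl | hj'
      · exact absurd hgt hg
      · exact ih _ ⟨j, hj', hgt⟩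

theorem chargeInner_some (k : Int) (cl : List Int) (idxs : List Int) (bus : Int)
    (h : ∀ i ∈ idxs, ¬ (pvG cl i - pvG cl (i - 1) > k)) :
    chargeInner k cl idxs bus = some (pvScan k cl idxs bus) := by
  induction idxs generalizing bus with
  | nil => simp [chargeInner, pvScan]
  | cons i rest ih =>
    simp only [chargeInner]
    simp only [pvG] at h
    rw [if_neg (h i (List.mem_cons_self))]
    rw [ih _ (fun j hj => by simpa [pvG] using h j (List.mem_cons_of_mem _ hj))]
    simp only [pvScan, List.foldl_cons, pvG]

-- monotone accessor from the sorted prefix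
theorem pvG_mono (cl : List Int) (m : Int) (hm : m ≤ (cl.length : Int))
    (hs : List.Pairwise (· ≤ ·) (cl.take m.toNat)) :
    ∀ i j : Int, 0 ≤ i → i ≤ j → j < m → pvG cl i ≤ pvG cl j := by
  intro i j hi hij hjm
  have hj0 : 0 ≤ j := le_trans hi hij
  have hjl : j < (cl.length : Int) := lt_of_lt_of_le hjm hm
  have hil : i < (cl.length : Int) := lt_of_le_of_lt hij hjl
  rw [pvG, pvG, PySem.List.pyGetD_eq_getElem cl (i := i) 0 hi hil,
      PySem.List.pyGetD_eq_getElem cl (i := j) 0 hj0 hjl]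
  rcases eq_or_lt_of_le hij with rfl | hlt
  · exact le_refl _
  · have hjt : j.toNat < (cl.take m.toNat).length := by
      simp [List.length_take]; omega
    have hit : i.toNat < (cl.take m.toNat).length := by
      simp [List.length_take]; omega
    have := (List.pairwise_iff_getElem.mp hs) i.toNat j.toNat hit hjt (by omega)
    simpa [List.getElem_take] using this

-- Source B's binary search returns a split point of its (sorted) list around x
theorem bisectLoop_spec (stops : List Int) (m x : Int)
    (mono : ∀ i j : Int, 0 ≤ i → i ≤ j → j < m → pvG stops i ≤ pvG stops j) :
    ∀ (fuel : Nat) (lo hi : Int), 0 ≤ lo → lo ≤ hi → hi ≤ m → (hi - lo).toNat ≤ fuel →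
    (∀ i, 0 ≤ i → i < lo → pvG stops i ≤ x) → (∀ i, hi ≤ i → i < m → x < pvG stops i) →
    (0 ≤ bisectLoop stops x fuel lo hi ∧ bisectLoop stops x fuel lo hi ≤ m ∧
     (∀ i, 0 ≤ i → i < bisectLoop stops x fuel lo hi → pvG stops i ≤ x) ∧
     (∀ i, bisectLoop stops x fuel lo hi ≤ i → i < m → x < pvG stops i)) := by
  intro fuel
  induction fuel with
  | zero =>
    intro lo hi h0 hlh hhm hfuel hlow hhigh
    simp only [bisectLoop]
    exact ⟨h0, by omega, hlow, fun i hri him => hhigh i (by omega) him⟩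
  | succ f ih =>
    intro lo hi h0 hlh hhm hfuel hlow hhigh
    simp only [bisectLoop]
    by_cases hlt : lo < hi
    · rw [if_pos hlt]
      have hmid := PySem.Int.floordiv_two_mid_bounds (le_of_lt hlt)
      have hmidlt : PySem.Int.floordiv (lo + hi) 2 < hi := by
        rw [PySem.Int.floordiv_lt_iff_lt_mul (by norm_num)]; omega
      by_cases hcm : PySem.List.pyGetD stops (PySem.Int.floordiv (lo + hi) 2) 0 ≤ x
      · rw [if_pos hcm]
        refine ih (PySem.Int.floordiv (lo + hi) 2 + 1) hi (by omega) (by omega) hhm (by omega) ?_ hhigh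
        intro i hi0 hilt
        have h1 : pvG stops i ≤ pvG stops (PySem.Int.floordiv (lo + hi) 2) :=
          mono i _ hi0 (by omega) (by omega)
        have h2 : pvG stops (PySem.Int.floordiv (lo + hi) 2) ≤ x := by simpa [pvG] using hcm
        omega
      · rw [if_neg hcm]
        refine ih lo (PySem.Int.floordiv (lo + hi) 2) h0 (by omega) (by omega) (by omega) hlow ?_
        intro i hmi him
        have h1 : pvG stops (PySem.Int.floordiv (lo + hi) 2) ≤ pvG stops i :=
          mono _ i (by omega) hmi him
        have h2 : x < pvG stops (PySem.Int.floordiv (lo + hi) 2) := by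
          simpa [pvG] using lt_of_not_ge hcm
        omega
    · rw [if_neg hlt]
      exact ⟨h0, by omega, hlow, fun i hri him => hhigh i (by omega) him⟩

-- splitting a unit-step range
theorem pyRange_one_split (a b c : Int) (hab : a ≤ b) (hbc : b ≤ c) :
    PySem.List.pyRange a c 1 = PySem.List.pyRange a b 1 ++ PySem.List.pyRange b c 1 := by
  rw [PySem.List.pyRange_one, PySem.List.pyRange_one, PySem.List.pyRange_one]
  have h1 : (c - a).toNat = (b - a).toNat + (c - b).toNat := by omega
  rw [h1, List.range_add, List.map_append, List.map_map]
  congr 1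
  apply List.map_congr_left
  intro x _
  simp only [Function.comp_apply]
  omega

theorem pvScan_const (k : Int) (cl : List Int) (idxs : List Int) (x : Int)
    (h : ∀ i ∈ idxs, ¬ (x < pvG cl i ∧ pvG cl (i - 1) ≤ x)) :
    pvScan k cl idxs x = x := by
  induction idxs with
  | nil => rfl
  | cons i rest ih =>
    simp only [pvScan, List.foldl_cons]
    rw [if_neg (h i (List.mem_cons_self))]
    exact ih (fun j hj => h j (List.mem_cons_of_mem _ hj))

-- A's sequential snap scan equals the split-point snap, given the split point r
theorem pvScan_eq (k : Int) (cl : List Int) (m x r : Int)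
    (hr0 : 0 ≤ r) (hrm : r ≤ m)
    (hlow : ∀ i, 0 ≤ i → i < r → pvG cl i ≤ x)
    (hhigh : ∀ i, r ≤ i → i < m → x < pvG cl i) :
    pvScan k cl (PySem.List.pyRange 1 m 1) x =
      (if 1 ≤ r ∧ r ≤ m - 1 then pvG cl (r - 1) else x) := by
  by_cases hcase : 1 ≤ r ∧ r ≤ m - 1
  · obtain ⟨hr1, hrm1⟩ := hcase
    rw [if_pos ⟨hr1, hrm1⟩]
    rw [pyRange_one_split 1 r m hr1 (by omega),
        PySem.List.pyRange_one_cons (show r < m by omega)]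
    have hfirst : pvScan k cl (PySem.List.pyRange 1 r 1) x = x := by
      apply pvScan_const k
      intro i hi
      obtain ⟨h1, h2⟩ := PySem.List.mem_pyRange_one.mp hi
      intro ⟨hx, _⟩
      exact absurd (hlow i (by omega) h2) (not_le.mpr hx)
    rw [pvScan_append, pvScan_cons, hfirst,
        if_pos ⟨hhigh r (le_refl r) (by omega), hlow (r - 1) (by omega) (by omega)⟩]
    apply pvScan_const k
    intro i hi
    obtain ⟨h1, h2⟩ := PySem.List.mem_pyRange_one.mp hi
    intro ⟨_, hle⟩
    have hb : pvG cl (r - 1) ≤ x := hlow (r - 1) (by omega) (by omega)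
    have hgt : x < pvG cl (i - 1) := hhigh (i - 1) (by omega) (by omega)
    omega
  · rw [if_neg hcase]
    apply pvScan_const k
    intro i hi
    obtain ⟨h1, h2⟩ := PySem.List.mem_pyRange_one.mp hi
    rcases (by omega : r ≤ 0 ∨ m ≤ r) with hr | hr
    · intro ⟨_, hle⟩
      exact absurd (hhigh (i - 1) (by omega) (by omega)) (not_lt.mpr hle)
    · intro ⟨hx, _⟩
      exact absurd (hlow i (by omega) (by omega)) (not_le.mpr hx)

-- the slice cl[:m] is a take, for 0 ≤ m
theorem slice_to_take (cl : List Int) (m : Int) (hm : 0 ≤ m) :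
    PySem.List.slice cl none (some m) = cl.take m.toNat := by
  have h := PySem.List.slice_to_natCast (xs := cl) (b := m.toNat)
  rw [show ((m.toNat : Nat) : Int) = m by omega] at h
  exact h

-- indexing the taken prefix agrees with indexing cl
theorem pvG_take (cl : List Int) (m i : Int) (hm : m ≤ (cl.length : Int))
    (h0 : 0 ≤ i) (him : i < m) :
    pvG (cl.take m.toNat) i = pvG cl i := by
  have hl : (cl.take m.toNat).length = m.toNat := by simp [List.length_take]; omega
  rw [pvG, pvG, PySem.List.pyGetD_eq_getElem _ 0 h0 (by rw [hl]; omega),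
      PySem.List.pyGetD_eq_getElem _ 0 h0 (by omega)]
  exact List.getElem_take

-- tooFar is an adjacent-pair test
theorem tooFar_iff (k : Int) (r : List Int) :
    tooFar k r = true ↔ ∃ i : Nat, i + 1 < r.length ∧ r.getD (i + 1) 0 - r.getD i 0 > k := by
  induction r with
  | nil => simp [tooFar]
  | cons a t ih =>
    cases t with
    | nil => simp [tooFar]
    | cons b t' =>
      have hstep : tooFar k (a :: b :: t') = (decide (b - a > k) || tooFar k (b :: t')) := by
        simp [tooFar, List.zip]
      rw [hstep]
      constructor
      · intro h
        rcases Bool.or_eq_true_iff.mp h with h1 | h2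
        · exact ⟨0, by simp, by simpa using of_decide_eq_true h1⟩
        · obtain ⟨i, hlen, hgt⟩ := ih.mp h2
          exact ⟨i + 1, by simpa using hlen, by simpa using hgt⟩
      · rintro ⟨i, hlen, hgt⟩
        cases i with
        | zero => exact Bool.or_eq_true_iff.mpr (Or.inl (by simpa using hgt))
        | succ j =>
          refine Bool.or_eq_true_iff.mpr (Or.inr (ih.mpr ⟨j, ?_, ?_⟩))
          · simpa using hlen
          · simpa using hgt

-- indexing the route 0 :: (s ++ [n])
theorem route_getD_zero (s : List Int) (n : Int) : (0 :: (s ++ [n])).getD 0 0 = 0 := rfl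

theorem route_getD_mid (s : List Int) (n : Int) (i : Nat) (h : i < s.length) :
    (0 :: (s ++ [n])).getD (i + 1) 0 = s.getD i 0 := by
  simp [List.getD, List.getElem?_append_left h]

theorem route_getD_last (s : List Int) (n : Int) :
    (0 :: (s ++ [n])).getD (s.length + 1) 0 = n := by
  simp [List.getD]

-- s.getD at a nat index is pvG at the cast index
theorem getD_eq_pvG (s : List Int) (i : Nat) : s.getD i 0 = pvG s (i : Int) := by
  rw [pvG, PySem.List.pyGetD_natCast]

-- B's feasibility check fires on any oversized inter-charger gap
theorem tooFar_of_gap (k n m : Int) (cl : List Int) (hm0 : 0 ≤ m) (hm : m ≤ (cl.length : Int))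
    (h : ∃ i ∈ PySem.List.pyRange 1 m 1, pvG cl i - pvG cl (i - 1) > k) :
    tooFar k (0 :: (cl.take m.toNat ++ [n])) = true := by
  obtain ⟨i, hi, hgt⟩ := h
  obtain ⟨h1, h2⟩ := PySem.List.mem_pyRange_one.mp hi
  set s := cl.take m.toNat with hs
  have hl : s.length = m.toNat := by simp [hs, List.length_take]; omega
  rw [tooFar_iff]
  refine ⟨i.toNat, by simp [hl]; omega, ?_⟩
  have e1 : (0 :: (s ++ [n])).getD (i.toNat + 1) 0 = pvG cl i := by
    rw [route_getD_mid s n i.toNat (by omega), getD_eq_pvG,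
        show ((i.toNat : Nat) : Int) = i by omega]
    exact pvG_take cl m i hm (by omega) h2
  have e0 : (0 :: (s ++ [n])).getD i.toNat 0 = pvG cl (i - 1) := by
    rw [show i.toNat = (i - 1).toNat + 1 by omega,
        route_getD_mid s n (i - 1).toNat (by omega), getD_eq_pvG,
        show (((i - 1).toNat : Nat) : Int) = i - 1 by omega]
    exact pvG_take cl m (i - 1) hm (by omega) (by omega)
  rw [e1, e0]; exact hgt

-- B's feasibility check fires on an unreachable first stop / goal / empty route
theorem tooFar_of_boundary (k n m : Int) (cl : List Int) (hm0 : 0 ≤ m)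
    (hm : m ≤ (cl.length : Int)) (hkn : k < n)
    (h : m ≤ 0 ∨ k < pvG cl 0 ∨ pvG cl (m - 1) + k < n) :
    tooFar k (0 :: (cl.take m.toNat ++ [n])) = true := by
  set s := cl.take m.toNat with hs
  have hl : s.length = m.toNat := by simp [hs, List.length_take]; omega
  rw [tooFar_iff]
  rcases h with h | h | h
  · have hm' : m = 0 := le_antisymm h hm0
    refine ⟨0, by simp [hl, hm'], ?_⟩
    have : s = [] := by rw [hs, hm']; rfl
    simp [this]; omega
  · by_cases h1 : 1 ≤ m
    · refine ⟨0, by simp, ?_⟩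
      rw [route_getD_zero, route_getD_mid s n 0 (by omega), getD_eq_pvG,
          show ((0 : Nat) : Int) = 0 by rfl, pvG_take cl m 0 hm (le_refl 0) (by omega)]
      omega
    · have hm' : m = 0 := by omega
      refine ⟨0, by simp [hl, hm'], ?_⟩
      have : s = [] := by rw [hs, hm']; rfl
      simp [this]; omega
  · by_cases h1 : 1 ≤ m
    · refine ⟨s.length, by simp, ?_⟩
      rw [route_getD_last,
          show s.length = (m - 1).toNat + 1 by omega,
          route_getD_mid s n (m - 1).toNat (by omega), getD_eq_pvG,
          show (((m - 1).toNat : Nat) : Int) = m - 1 by omega,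
          pvG_take cl m (m - 1) hm (by omega) (by omega)]
      omega
    · have hm' : m = 0 := by omega
      refine ⟨0, by simp [hl, hm'], ?_⟩
      have : s = [] := by rw [hs, hm']; rfl
      simp [this]; omega

-- on a feasible route the check never fires
theorem tooFar_false_of_feasible (k n m : Int) (cl : List Int)
    (hm : m ≤ (cl.length : Int)) (hm1 : 1 ≤ m)
    (nogap : ∀ i ∈ PySem.List.pyRange 1 m 1, pvG cl i - pvG cl (i - 1) ≤ k)
    (hcl0 : pvG cl 0 ≤ k) (hlast : n ≤ pvG cl (m - 1) + k) :
    tooFar k (0 :: (cl.take m.toNat ++ [n])) = false := by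
  set s := cl.take m.toNat with hs
  have hl : s.length = m.toNat := by simp [hs, List.length_take]; omega
  rw [Bool.eq_false_iff]
  intro htrue
  obtain ⟨i, hlen, hgt⟩ := (tooFar_iff k _).mp htrue
  have hlen' : i + 1 < s.length + 2 := by simpa [List.length_append] using hlen
  by_cases hi0 : i = 0
  · subst hi0
    rw [route_getD_zero, route_getD_mid s n 0 (by omega), getD_eq_pvG,
        show ((0 : Nat) : Int) = 0 by rfl, pvG_take cl m 0 hm (le_refl 0) (by omega)] at hgt
    omega
  · by_cases hilast : i = s.length
    · subst hilast
      rw [route_getD_last,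
          show s.length = (m - 1).toNat + 1 by omega,
          route_getD_mid s n (m - 1).toNat (by omega), getD_eq_pvG,
          show (((m - 1).toNat : Nat) : Int) = m - 1 by omega,
          pvG_take cl m (m - 1) hm (by omega) (by omega)] at hgt
      omega
    · have hi1 : 1 ≤ i ∧ i < s.length := by omega
      obtain ⟨hi1, hi2⟩ := hi1
      rw [route_getD_mid s n i hi2, getD_eq_pvG,
          pvG_take cl m (i : Int) hm (by omega) (by omega),
          show i = (i - 1) + 1 by omega,
          route_getD_mid s n (i - 1) (by omega), getD_eq_pvG,
          pvG_take cl m ((i - 1 : Nat) : Int) hm (by omega) (by omega)] at hgt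
      have hng := nogap (i : Int) (PySem.List.mem_pyRange_one.mpr ⟨by omega, by omega⟩)
      have e : ((i : Int)) - 1 = ((i - 1 : Nat) : Int) := by omega
      rw [e] at hng
      have e2 : ((i - 1 + 1 : Nat) : Int) = (i : Int) := by omega
      rw [e2] at hgt
      omega

-- exiting immediately when the goal is within reach
theorem chargeLoopA_stop (k n m : Int) (cl : List Int) (fuel : Nat) (bus count : Int)
    (h : n ≤ bus + k) : chargeLoopA k n m cl fuel bus count = count := by
  cases fuel with
  | zero => rfl
  | succ f => simp only [chargeLoopA]; rw [if_pos h]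

theorem chargeLoopB_stop (k n : Int) (s : List Int) (fuel : Nat) (pos count : Int)
    (h : n ≤ pos + k) : chargeLoopB k n s fuel pos count = count := by
  cases fuel with
  | zero => rfl
  | succ f => simp only [chargeLoopB]; rw [if_neg (by omega)]

-- with no oversized gap, A's loop never resets the count
theorem chargeLoopA_ge (k n m : Int) (cl : List Int)
    (nogap : ∀ i ∈ PySem.List.pyRange 1 m 1, ¬ (pvG cl i - pvG cl (i - 1) > k)) :
    ∀ (fuel : Nat) (bus count : Int), count ≤ chargeLoopA k n m cl fuel bus count := by
  intro fuel
  induction fuel with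
  | zero => intro bus count; exact le_refl count
  | succ f ih =>
    intro bus count
    simp only [chargeLoopA]
    by_cases hb : n ≤ bus + k
    · rw [if_pos hb]
    · rw [if_neg hb, chargeInner_some k cl _ _ nogap]
      calc count ≤ count + 1 := by omega
        _ ≤ _ := ih _ _

-- the two driving loops agree on feasible routes
theorem loops_eq_feas (k n m : Int) (cl : List Int)
    (hm : m ≤ (cl.length : Int)) (hm1 : 1 ≤ m) (hk : 1 ≤ k)
    (mono : ∀ i j : Int, 0 ≤ i → i ≤ j → j < m → pvG cl i ≤ pvG cl j)
    (nogap : ∀ i ∈ PySem.List.pyRange 1 m 1, pvG cl i - pvG cl (i - 1) ≤ k)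
    (hcl0 : pvG cl 0 ≤ k) (hlast : n ≤ pvG cl (m - 1) + k) :
    ∀ (fuel : Nat) (bus count : Int), 0 ≤ bus →
      chargeLoopA k n m cl fuel bus count = chargeLoopB k n (cl.take m.toNat) fuel bus count := by
  have hl : (cl.take m.toNat).length = m.toNat := by simp [List.length_take]; omega
  have hlm : ((cl.take m.toNat).length : Int) = m := by rw [hl]; omega
  have mono_s : ∀ i j : Int, 0 ≤ i → i ≤ j → j < ((cl.take m.toNat).length : Int) →
      pvG (cl.take m.toNat) i ≤ pvG (cl.take m.toNat) j := by
    intro i j h0 hij hjm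
    rw [hlm] at hjm
    rw [pvG_take cl m i hm h0 (by omega), pvG_take cl m j hm (by omega) hjm]
    exact mono i j h0 hij hjm
  intro fuel
  induction fuel with
  | zero => intro bus count _; rfl
  | succ f ih =>
    intro bus count hbus
    simp only [chargeLoopA, chargeLoopB]
    by_cases hb : n ≤ bus + k
    · rw [if_pos hb, if_neg (by omega)]
    · rw [if_neg hb, if_pos (by omega)]
      rw [chargeInner_some k cl _ _ (fun i hi hgt => absurd hgt (not_lt.mpr (nogap i hi)))]
      set x := bus + k with hx
      obtain ⟨hlo0, hlom, hlow_s, hhigh_s⟩ :=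
        bisectLoop_spec (cl.take m.toNat) ((cl.take m.toNat).length : Int) x mono_s
          ((cl.take m.toNat).length + 1) 0 ((cl.take m.toNat).length : Int)
          (le_refl 0) (by positivity) (le_refl _) (by omega)
          (fun i h0 hi => absurd hi (by omega))
          (fun i hmi him => absurd (lt_of_le_of_lt hmi him) (lt_irrefl _))
      set lo := bisectLoop (cl.take m.toNat) x ((cl.take m.toNat).length + 1) 0
        ((cl.take m.toNat).length : Int) with hlo
      rw [hlm] at hlom
      have hlow_c : ∀ i, 0 ≤ i → i < lo → pvG cl i ≤ x := by
        intro i h0 hi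
        rw [← pvG_take cl m i hm h0 (by omega)]
        exact hlow_s i h0 hi
      have hhigh_c : ∀ i, lo ≤ i → i < m → x < pvG cl i := by
        intro i hli him
        rw [← pvG_take cl m i hm (by omega) him]
        exact hhigh_s i hli (by omega)
      rw [pvScan_eq k cl m x lo hlo0 hlom hlow_c hhigh_c]
      have hlo1 : 1 ≤ lo := by
        by_contra hc
        have : lo = 0 := by omega
        have := hhigh_c 0 (by omega) (by omega)
        omega
      have hBbus : PySem.List.pyGetD (cl.take m.toNat) (lo - 1) 0 = pvG cl (lo - 1) := by
        rw [show PySem.List.pyGetD (cl.take m.toNat) (lo - 1) 0 = pvG (cl.take m.toNat) (lo - 1) from rfl]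
        exact pvG_take cl m (lo - 1) hm (by omega) (by omega)
      by_cases hcase : lo ≤ m - 1
      · rw [if_pos ⟨hlo1, hcase⟩]
        have hgap := nogap lo (PySem.List.mem_pyRange_one.mpr ⟨hlo1, by omega⟩)
        have hhi := hhigh_c lo (le_refl lo) (by omega)
        rw [hBbus]
        exact ih (pvG cl (lo - 1)) (count + 1) (by omega)
      · have hlom' : lo = m := by omega
        rw [if_neg (by omega)]
        have hle : pvG cl (m - 1) ≤ x := hlow_c (m - 1) (by omega) (by omega)
        rw [hBbus]
        show chargeLoopA k n m cl f x (count + 1) =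
          chargeLoopB k n (cl.take m.toNat) f (pvG cl (lo - 1)) (count + 1)
        rw [chargeLoopA_stop k n m cl f x (count + 1) (by omega),
            chargeLoopB_stop k n (cl.take m.toNat) f (pvG cl (lo - 1)) (count + 1)
              (by rw [hlom']; omega)]

-- ===== VERDICT (by name: the statement is the Claim_ definition above) =====
theorem charge_point_spec : Claim_unchanged_charge_point := by
  intro k n m cl _ hpre hnd
  rcases hpre with hnk0 | ⟨hm0, hm, hdisj⟩
  · -- the goal is within reach at once: both programs return 0
    unfold charge_point charge_point_alt
    rw [chargeLoopA_stop k n m cl _ 0 0 (by omega)]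
    by_cases ht : tooFar k (0 :: (PySem.List.slice cl none (some m) ++ [n])) = true
    · rw [if_pos ht]
    · rw [if_neg ht, chargeLoopB_stop k n _ _ 0 0 (by omega)]
  unfold charge_point charge_point_alt
  rw [slice_to_take cl m hm0]
  by_cases hgap : ∃ i ∈ PySem.List.pyRange 1 m 1, pvG cl i - pvG cl (i - 1) > k
  · rw [if_pos (tooFar_of_gap k n m cl hm0 hm hgap)]
    by_cases hnk : n ≤ 0 + k
    · exact chargeLoopA_stop k n m cl _ 0 0 hnk
    · simp only [chargeLoopA]
      rw [if_neg hnk, chargeInner_none k cl _ _ hgap]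
  · have nogap : ∀ i ∈ PySem.List.pyRange 1 m 1, pvG cl i - pvG cl (i - 1) ≤ k := by
      intro i hi
      by_contra hc
      exact hgap ⟨i, hi, by omega⟩
    by_cases hnk : n ≤ k
    · rw [chargeLoopA_stop k n m cl _ 0 0 (by omega)]
      by_cases ht : tooFar k (0 :: (cl.take m.toNat ++ [n])) = true
      · rw [if_pos ht]
      · rw [if_neg ht, chargeLoopB_stop k n _ _ 0 0 (by omega)]
    · -- k < n; Pre_'s disjunction leaves the sorted, k ≥ 1 case
      rcases hdisj with hex | ⟨hk, hs⟩
      · exact absurd (by simpa [pvG] using hex) hgap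
      · -- ¬ D_ forces a feasible route
        unfold D_charge_point at hnd
        push_neg at hnd
        have hbound := hnd (by omega) (fun i hi => by
          simpa [pvG] using nogap i hi)
        obtain ⟨hb1, hb2, hb3⟩ := hbound
        have hm1 : 1 ≤ m := by omega
        have hcl0 : pvG cl 0 ≤ k := by simpa [pvG] using hb2
        have hlast : n ≤ pvG cl (m - 1) + k := by
          have := hb3; simp only [pvG]; omega
        rw [if_neg (by
          rw [tooFar_false_of_feasible k n m cl hm hm1 nogap hcl0 hlast]
          simp)]
        exact loops_eq_feas k n m cl hm hm1 hk (pvG_mono cl m hm hs) nogap hcl0 hlast _ 0 0 (le_refl 0)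

theorem charge_point_changed : Claim_changed_charge_point := by
  unfold Claim_changed_charge_point; decide

theorem charge_point_tight : Claim_exact_charge_point := by
  intro k n m cl _ hpre hd
  obtain ⟨hkn, hgaps, hbound⟩ := hd
  rcases hpre with hnk0 | ⟨hm0, hm, hdisj⟩
  · omega
  have nogap : ∀ i ∈ PySem.List.pyRange 1 m 1, pvG cl i - pvG cl (i - 1) ≤ k := fun i hi => by
    simpa [pvG] using hgaps i hi
  have hBzero : charge_point_alt k n m cl = 0 := by
    unfold charge_point_alt
    rw [slice_to_take cl m hm0,
        if_pos (tooFar_of_boundary k n m cl hm0 hm hkn (by simpa [pvG] using hbound))]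
  rw [hBzero]
  unfold charge_point
  simp only [chargeLoopA]
  rw [if_neg (by omega : ¬ n ≤ 0 + k),
      chargeInner_some k cl _ _ (fun i hi hgt => absurd hgt (not_lt.mpr (nogap i hi)))]
  have := chargeLoopA_ge k n m cl
    (fun i hi hgt => absurd hgt (not_lt.mpr (nogap i hi))) n.toNat
    (pvScan k cl (PySem.List.pyRange 1 m 1) (0 + k)) 1
  show chargeLoopA k n m cl n.toNat (pvScan k cl (PySem.List.pyRange 1 m 1) (0 + k)) 1 ≠ 0
  omega
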